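-- pv_equiv track=rewrite | github.com/JHJee/problem-solving-in-python | Programmers/PRG_Exercise_12916_numofpandy.py | solution
-- ===== SOURCE A (Python) =====
-- def solution(s):
--     answer = True
--     s = [item for item in s]
--     p = s.count("P") + s.count("p")
--     y = s.count("Y") + s.count("y")
--     if p != y:
--         answer = False
--     return answer
-- ===== SOURCE B (Python) =====
-- def solution(s):
--     p = 0
--     y = 0
--     for c in s:
--         if c in ('P', 'p'):
--             p += 1
--         if c in ('Y', 'y'):
--             y += 1
--     return p == y
-- ===== Notes on version B (the rewrite author's own statement) =====
-- stated objective: simpler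
-- what changed: Replaces building an intermediate list and four separate .count() scans with a single accumulating pass over the string that tallies p and y counters together.
import Mathlib
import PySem

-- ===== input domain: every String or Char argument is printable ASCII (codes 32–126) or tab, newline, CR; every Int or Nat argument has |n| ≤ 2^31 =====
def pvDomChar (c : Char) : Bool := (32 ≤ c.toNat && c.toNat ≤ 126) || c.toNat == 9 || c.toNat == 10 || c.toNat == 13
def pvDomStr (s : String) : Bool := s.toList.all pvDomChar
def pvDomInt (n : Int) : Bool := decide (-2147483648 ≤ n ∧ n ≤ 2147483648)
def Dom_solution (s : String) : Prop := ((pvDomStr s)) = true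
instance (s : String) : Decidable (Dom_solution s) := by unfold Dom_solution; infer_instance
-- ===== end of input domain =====

-- B replaces A's intermediate list and four .count() scans by one accumulating pass; objective: simpler.

-- ===== PORT A =====
def solution (s : String) : Bool :=
  let answer := true
  let l := s.toList                     -- s = [item for item in s]
  let p : Int := (PySem.List.count l 'P' : Int) + (PySem.List.count l 'p' : Int)
  let y : Int := (PySem.List.count l 'Y' : Int) + (PySem.List.count l 'y' : Int)
  if p ≠ y then false else answer

-- ===== PORT B =====
def solution_alt (s : String) : Bool :=
  let r := s.toList.foldl
    (fun (acc : Int × Int) c =>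
      ((if c == 'P' || c == 'p' then acc.1 + 1 else acc.1),
       (if c == 'Y' || c == 'y' then acc.2 + 1 else acc.2)))
    (0, 0)
  r.1 == r.2

-- ===== PRECONDITION & SPEC =====
def Spec_solution (s : String) (out : Bool) : Prop := out = solution_alt s
instance (s : String) (out : Bool) : Decidable (Spec_solution s out) := by unfold Spec_solution; infer_instance

-- ===== CLAIM (what is proved, stated in full; the proofs are below) =====
def Claim_equal_solution : Prop := ∀ (s : String), Dom_solution s → Spec_solution s (solution s)

-- ===== LEMMAS AND PROOFS =====

theorem pv_fold_counts (l : List Char) (a b : Int) :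
    l.foldl
      (fun (acc : Int × Int) c =>
        ((if c == 'P' || c == 'p' then acc.1 + 1 else acc.1),
         (if c == 'Y' || c == 'y' then acc.2 + 1 else acc.2)))
      (a, b)
    = (a + (l.count 'P' : Int) + (l.count 'p' : Int),
       b + (l.count 'Y' : Int) + (l.count 'y' : Int)) := by
  induction l generalizing a b with
  | nil => simp
  | cons c t ih =>
      simp only [List.foldl_cons, ih, List.count_cons]
      by_cases hP : c = 'P' <;> by_cases hp : c = 'p' <;>
        by_cases hY : c = 'Y' <;> by_cases hy : c = 'y' <;>
        simp_all <;> omega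

-- ===== VERDICT (by name: the statement is the Claim_ definition above) =====
theorem solution_spec : Claim_equal_solution := by
  intro s _
  unfold Spec_solution solution solution_alt
  rw [pv_fold_counts]
  simp only [PySem.List.count, zero_add]
  split_ifs with h <;> simp_all
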